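-- pv_equiv track=rewrite | github.com/ChakradharG/CompetitiveCoding | LeetCode/Chakradhar/3725.py | countCoprime
-- ===== SOURCE A (Python) =====
-- from typing import List
--
-- def countCoprime(mat: List[List[int]]) -> int:
--     def gcd(a, b):
--         while b:
--             a, b = b, a % b
--         return a
--
--     def dfs(i, cur):
--         if i == m:
--             return cur == 1
--         key = (i, cur)
--         if key not in memo:
--             res = 0
--             for j in range(n):
--                 ncur = gcd(cur, mat[i][j])
--                 if ncur == 1:
--                     x = (n ** (m - i - 1)) % MOD
--                 else:
--                     x = dfs(i+1, ncur)
--                 res = (res + x) % MOD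
--             memo[key] = res
--         return memo[key]
--
--     m, n = len(mat), len(mat[0])
--     memo = {}
--     MOD = 10**9 + 7
--     ans = 0
--     for j in range(n):
--         ans = (ans + dfs(1, mat[0][j])) % MOD
--     return ans
-- ===== SOURCE B (Python) =====
-- def countCoprime(mat):
--     MOD = 10**9 + 7
--
--     def gcd(a, b):
--         while b:
--             a, b = b, a % b
--         return a
--
--     n = len(mat[0])
--     # counts: running-gcd value -> number of paths (mod MOD) still "alive";
--     # done: paths already absorbed because their running gcd hit exactly 1.
--     counts = {}
--     for v in mat[0]:
--         counts[v] = counts.get(v, 0) + 1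
--     done = 0
--     for row in mat[1:]:
--         done = done * n % MOD
--         new = {}
--         for g, c in counts.items():
--             for j in range(n):
--                 ng = gcd(g, row[j])
--                 if ng == 1:
--                     done = (done + c) % MOD
--                 else:
--                     new[ng] = (new.get(ng, 0) + c) % MOD
--         counts = new
--     return (done + counts.get(1, 0)) % MOD
-- ===== Notes on version B (the rewrite author's own statement) =====
-- stated objective: alternative
-- what changed: Replaced A's memoized top-down DFS over (row,gcd) states with a forward bottom-up DP that sweeps the rows once, maintaining a dict from running-gcd value to path count plus a single 'done' accumulator for paths whose gcd already hit 1 (multiplied by n per remaining row, matching A's n**(m-i-1) short-circuit); Pre_ excludes the empty matrix and ragged matrices with a row shorter than row 0, where A's indexing can raise IndexError.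
-- outside the precondition, e.g. on countCoprime([[1, 1], [1, 1], [1]]): A returns 8, B returns 8
import Mathlib
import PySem

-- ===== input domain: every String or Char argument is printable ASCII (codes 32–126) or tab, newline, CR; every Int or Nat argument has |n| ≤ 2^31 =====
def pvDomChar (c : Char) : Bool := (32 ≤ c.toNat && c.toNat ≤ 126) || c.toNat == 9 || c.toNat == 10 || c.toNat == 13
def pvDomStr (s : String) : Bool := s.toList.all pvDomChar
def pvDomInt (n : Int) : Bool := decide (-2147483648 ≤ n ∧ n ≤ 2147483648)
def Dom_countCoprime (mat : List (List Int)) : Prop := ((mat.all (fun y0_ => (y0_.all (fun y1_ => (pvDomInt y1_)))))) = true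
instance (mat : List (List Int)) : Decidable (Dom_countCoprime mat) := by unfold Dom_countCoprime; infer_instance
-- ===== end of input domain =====

-- B replaces A's memoized top-down DFS with a forward DP over rows keeping a
-- dict from running-gcd value to path count plus an absorbed-paths accumulator
-- (objective: alternative decomposition, same asymptotic cost).

-- ===== PORT A =====
-- termination fact for the hand-written Euclid loop 'while b: a, b = b, a % b'
theorem pygcd_dec (a b : Int) (h : b ≠ 0) : (PySem.Int.mod a b).natAbs < b.natAbs := by
  rcases lt_or_gt_of_ne h with hb | hb
  · have := PySem.Int.mod_neg_bounds a hb
    omega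
  · have h1 := PySem.Int.mod_nonneg a hb
    have h2 := PySem.Int.mod_lt a hb
    omega

-- the nested helper 'gcd' (textually identical in A and in B, so shared)
def pygcd (a b : Int) : Int :=
  if h : b = 0 then a else pygcd b (PySem.Int.mod a b)
termination_by b.natAbs
decreasing_by exact pygcd_dec a b h

-- dfs(i, cur) threading the memo dict; 'fuel' (= m - i at every call site) is
-- only a structural-termination guard, never consumed while i < m.
def dfsA (mat : List (List Int)) (m n : Nat) :
    Nat → Nat → Int → PySem.Dict (Nat × Int) Int → Int × PySem.Dict (Nat × Int) Int
  | fuel, i, cur, memo =>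
    if i = m then ((if cur = 1 then 1 else 0), memo)
    else
      match fuel with
      | 0 => (0, memo)  -- unreachable totality guard: fuel = m - i > 0 when i < m
      | fuel + 1 =>
        match memo.get? (i, cur) with
        | some v => (v, memo)
        | none =>
          let res := (List.range n).foldl
            (fun (acc : Int × PySem.Dict (Nat × Int) Int) j =>
              if pygcd cur ((mat.getD i []).getD j 0) = 1 then
                (PySem.Int.mod (acc.1 + PySem.Int.mod ((n : Int) ^ (m - i - 1)) 1000000007)
                   1000000007, acc.2)
              else
                (PySem.Int.mod (acc.1 +
                    (dfsA mat m n fuel (i + 1) (pygcd cur ((mat.getD i []).getD j 0)) acc.2).1)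
                   1000000007,
                 (dfsA mat m n fuel (i + 1) (pygcd cur ((mat.getD i []).getD j 0)) acc.2).2))
            (0, memo)
          let memo2 := res.2.insert (i, cur) res.1
          (res.1, memo2)  -- 'return memo[key]' right after the insertion

def countCoprime (mat : List (List Int)) : Int :=
  let m := mat.length
  let n := (mat.headD []).length
  ((List.range n).foldl
    (fun (acc : Int × PySem.Dict (Nat × Int) Int) j =>
      let r := dfsA mat m n (m - 1) 1 ((mat.headD []).getD j 0) acc.2
      (PySem.Int.mod (acc.1 + r.1) 1000000007, r.2))
    (0, PySem.Dict.empty)).1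

-- ===== PORT B =====
-- one row of the forward DP: rescale 'done', push every live (gcd, count) pair
-- through every column, absorbing pairs whose new gcd is exactly 1
def stepB (n : Nat) (st : PySem.Dict Int Int × Int) (row : List Int) :
    PySem.Dict Int Int × Int :=
  let done := PySem.Int.mod (st.2 * (n : Int)) 1000000007
  st.1.items.foldl
    (fun (acc : PySem.Dict Int Int × Int) gc =>
      (List.range n).foldl
        (fun (acc2 : PySem.Dict Int Int × Int) j =>
          let ng := pygcd gc.1 (row.getD j 0)
          if ng = 1 then (acc2.1, PySem.Int.mod (acc2.2 + gc.2) 1000000007)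
          else (acc2.1.insert ng (PySem.Int.mod (acc2.1.getD ng 0 + gc.2) 1000000007), acc2.2))
        acc)
    (PySem.Dict.empty, done)

def countCoprime_alt (mat : List (List Int)) : Int :=
  let n := (mat.headD []).length
  let counts0 := (mat.headD []).foldl
    (fun (d : PySem.Dict Int Int) v => d.insert v (d.getD v 0 + 1)) PySem.Dict.empty
  let fin := mat.tail.foldl (stepB n) (counts0, 0)
  PySem.Int.mod (fin.2 + fin.1.getD 1 0) 1000000007

-- ===== PRECONDITION & SPEC =====
-- Pre_ excludes the inputs where A's indexing mat[0] / mat[i][j] (j < len(mat[0]))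
-- can raise IndexError: the empty matrix and matrices with a later row shorter than
-- row 0; on some such ragged matrices the memoized shortcut happens to skip the short
-- row and both A and B still return the same value (see the cite in claim.json).
def Pre_countCoprime (mat : List (List Int)) : Prop :=
  mat ≠ [] ∧ ∀ r ∈ mat, (mat.headD []).length ≤ r.length
instance (mat : List (List Int)) : Decidable (Pre_countCoprime mat) := by
  unfold Pre_countCoprime; infer_instance

def pvWitness_countCoprime : List (List Int) := [[2, 3], [6, 5]]

def Spec_countCoprime (mat : List (List Int)) (out : Int) : Prop := out = countCoprime_alt mat
instance (mat : List (List Int)) (out : Int) : Decidable (Spec_countCoprime mat out) := by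
  unfold Spec_countCoprime; infer_instance

-- ===== CLAIM (what is proved, stated in full; the proofs are below) =====
def Claim_equal_countCoprime : Prop :=
  ∀ (mat : List (List Int)), Dom_countCoprime mat → Pre_countCoprime mat →
    Spec_countCoprime mat (countCoprime mat)

-- ===== LEMMAS AND PROOFS =====
theorem pm_eq (a : Int) : PySem.Int.mod a 1000000007 = a % 1000000007 :=
  PySem.Int.mod_eq_emod_of_pos (by norm_num)
theorem modeq_pm (a : Int) : a % 1000000007 ≡ a [ZMOD 1000000007] :=
  Int.emod_emod_of_dvd a dvd_rfl

theorem foldl_mod_eq {α : Type} (f : α → Int) (l : List α) (a : Int) :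
    l.foldl (fun acc x => (acc + f x) % 1000000007) (a % 1000000007)
      = (a + (l.map f).sum) % 1000000007 := by
  induction l generalizing a with
  | nil => simp
  | cons x t ih =>
    simp only [List.foldl_cons, List.map_cons, List.sum_cons]
    have h1 : (a % 1000000007 + f x) % 1000000007 = (a + f x) % 1000000007 := by
      conv_rhs => rw [Int.add_emod]
      rw [Int.add_emod (a % 1000000007)]
      rw [Int.emod_emod_of_dvd a dvd_rfl]
    rw [h1, ih (a + f x)]
    ring_nf

theorem foldl_mod_modeq {α : Type} (f : α → Int) (l : List α) (a : Int) :
    l.foldl (fun acc x => (acc + f x) % 1000000007) a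
      ≡ a + (l.map f).sum [ZMOD 1000000007] := by
  induction l generalizing a with
  | nil => simp
  | cons x t ih =>
    simp only [List.foldl_cons, List.map_cons, List.sum_cons]
    calc t.foldl (fun acc x => (acc + f x) % 1000000007) ((a + f x) % 1000000007)
        ≡ (a + f x) % 1000000007 + (t.map f).sum [ZMOD 1000000007] := ih _
      _ ≡ a + f x + (t.map f).sum [ZMOD 1000000007] :=
          Int.ModEq.add_right _ (modeq_pm _)
      _ = a + (f x + (t.map f).sum) := by ring

theorem sum_modeq {α : Type} (f g : α → Int) (l : List α)
    (h : ∀ x ∈ l, f x ≡ g x [ZMOD 1000000007]) :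
    (l.map f).sum ≡ (l.map g).sum [ZMOD 1000000007] := by
  induction l with
  | nil => rfl
  | cons x t ih =>
    simp only [List.map_cons, List.sum_cons]
    exact Int.ModEq.add (h x (by simp)) (ih fun y hy => h y (by simp [hy]))

theorem assoc_split (l : List (Int × Int)) (k v : Int)
    (hnd : (l.map Prod.fst).Nodup) (hm : (k, v) ∈ l) :
    ∃ l1 l2, l = l1 ++ (k, v) :: l2 ∧ (∀ p ∈ l1, p.1 ≠ k) ∧ (∀ p ∈ l2, p.1 ≠ k) := by
  obtain ⟨l1, l2, rfl⟩ := List.append_of_mem hm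
  rw [List.map_append, List.map_cons, List.nodup_append] at hnd
  refine ⟨l1, l2, rfl, ?_, ?_⟩
  · intro p hp hpk
    exact hnd.2.2 p.1 (List.mem_map_of_mem hp) k (by simp) hpk
  · intro p hp hpk
    have h2 := hnd.2.1
    rw [List.nodup_cons] at h2
    exact h2.1 (List.mem_map.mpr ⟨p, hp, hpk⟩)

theorem sum_single (S : List Int) (x : Int) (f : Int → Int) (hnd : S.Nodup) (hx : x ∈ S) :
    (S.map (fun k => if k = x then f k else 0)).sum = f x := by
  induction S with
  | nil => cases hx
  | cons a t ih =>
    rw [List.nodup_cons] at hnd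
    simp only [List.map_cons, List.sum_cons]
    by_cases hax : a = x
    · subst hax
      have hz : ∀ y ∈ t.map (fun k => if k = a then f k else 0), y = 0 := by
        intro y hy
        obtain ⟨k, hk, rfl⟩ := List.mem_map.mp hy
        have : k ≠ a := fun e => hnd.1 (e ▸ hk)
        simp [this]
      rw [if_pos rfl, List.sum_eq_zero hz]
      ring
    · have hxt : x ∈ t := by
        rcases List.mem_cons.mp hx with h | h
        · exact absurd h.symm hax
        · exact h
      rw [if_neg hax, ih hnd.2 hxt]
      ring
theorem keys_eq_map (d : PySem.Dict Int Int) : d.keys = d.items.map Prod.fst := rfl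

theorem sum_items_ite (d : PySem.Dict Int Int) (hnd : d.keys.Nodup) :
    (d.items.map (fun p => p.2 * (if p.1 = 1 then 1 else 0))).sum = d.getD 1 0 := by
  rw [keys_eq_map] at hnd
  cases hc : d.contains 1 with
  | false =>
    rw [PySem.Dict.getD_of_not_contains _ _ hc]
    apply List.sum_eq_zero
    intro y hy
    obtain ⟨p, hp, rfl⟩ := List.mem_map.mp hy
    have hp1 : p.1 ≠ 1 := by
      intro e
      have hk : (1 : Int) ∈ d.keys := e ▸ PySem.Dict.mem_keys_of_mem_items _ hp
      have : d.contains 1 = true := (PySem.Dict.contains_iff_mem_keys ..).mpr hk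
      simp [this] at hc
    simp [hp1]
  | true =>
    have hsome : (d.get? 1).isSome := by
      rw [← PySem.Dict.contains_eq_isSome_get?]; exact hc
    obtain ⟨v, hv⟩ := Option.isSome_iff_exists.mp hsome
    rw [PySem.Dict.getD_of_get?_eq_some _ _ hv]
    have hmem := PySem.Dict.mem_items_of_get?_eq_some _ hv
    obtain ⟨l1, l2, he, h1, h2⟩ := assoc_split d.items 1 v hnd hmem
    rw [he]
    simp only [List.map_append, List.map_cons, List.sum_append, List.sum_cons]
    rw [List.sum_eq_zero, List.sum_eq_zero]
    · simp
    · intro y hy; obtain ⟨p, hp, rfl⟩ := List.mem_map.mp hy; simp [h2 p hp]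
    · intro y hy; obtain ⟨p, hp, rfl⟩ := List.mem_map.mp hy; simp [h1 p hp]
theorem sum_items_insert (d : PySem.Dict Int Int) (hnd : d.keys.Nodup) (k a : Int) (F : Int → Int) :
    ((d.insert k ((d.getD k 0 + a) % 1000000007)).items.map (fun p => p.2 * F p.1)).sum
      ≡ (d.items.map (fun p => p.2 * F p.1)).sum + a * F k [ZMOD 1000000007] := by
  cases hc : d.contains k with
  | false =>
    rw [PySem.Dict.items_insert_of_not_contains _ _ hc,
        PySem.Dict.getD_of_not_contains _ _ hc]
    simp only [List.map_append, List.map_cons, List.map_nil, List.sum_append, List.sum_cons,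
      List.sum_nil, add_zero, zero_add]
    exact Int.ModEq.add_left _ (Int.ModEq.mul_right _ (modeq_pm a))
  | true =>
    have hsome : (d.get? k).isSome := by
      rw [← PySem.Dict.contains_eq_isSome_get?]; exact hc
    obtain ⟨v, hv⟩ := Option.isSome_iff_exists.mp hsome
    rw [PySem.Dict.getD_of_get?_eq_some _ _ hv,
        PySem.Dict.items_insert_of_contains _ _ hc]
    have hmem := PySem.Dict.mem_items_of_get?_eq_some _ hv
    rw [keys_eq_map] at hnd
    obtain ⟨l1, l2, he, h1, h2⟩ := assoc_split d.items k v hnd hmem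
    rw [he]
    have hl1 : l1.map (fun p => if p.1 == k then (k, (v + a) % 1000000007) else p) = l1 := by
      calc l1.map (fun p => if p.1 == k then (k, (v + a) % 1000000007) else p)
          = l1.map id := List.map_congr_left (fun p hp => if_neg (by simp [h1 p hp]))
        _ = l1 := List.map_id l1
    have hl2 : l2.map (fun p => if p.1 == k then (k, (v + a) % 1000000007) else p) = l2 := by
      calc l2.map (fun p => if p.1 == k then (k, (v + a) % 1000000007) else p)
          = l2.map id := List.map_congr_left (fun p hp => if_neg (by simp [h2 p hp]))
        _ = l2 := List.map_id l2
    simp only [List.map_append, List.map_cons, List.sum_append, List.sum_cons, hl1, hl2]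
    simp only [beq_self_eq_true, if_pos]
    have : ((v + a) % 1000000007) * F k ≡ v * F k + a * F k [ZMOD 1000000007] := by
      calc ((v + a) % 1000000007) * F k ≡ (v + a) * F k [ZMOD 1000000007] :=
            Int.ModEq.mul_right _ (modeq_pm _)
        _ = v * F k + a * F k := by ring
    calc (l1.map (fun p => p.2 * F p.1)).sum + (((v + a) % 1000000007) * F k + (l2.map (fun p => p.2 * F p.1)).sum)
        ≡ (l1.map (fun p => p.2 * F p.1)).sum + ((v * F k + a * F k) + (l2.map (fun p => p.2 * F p.1)).sum) [ZMOD 1000000007] :=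
          Int.ModEq.add_left _ (Int.ModEq.add_right _ this)
      _ = (l1.map (fun p => p.2 * F p.1)).sum + (v * F k + (l2.map (fun p => p.2 * F p.1)).sum) + a * F k := by ring

theorem map_range_getD (xs : List Int) :
    (List.range xs.length).map (fun j => xs.getD j 0) = xs := by
  apply List.ext_getElem (by simp)
  intro i h1 h2
  simp [List.getElem?_eq_getElem h2]

theorem sum_map_add' {α : Type} (f g : α → Int) (l : List α) :
    (l.map (fun x => f x + g x)).sum = (l.map f).sum + (l.map g).sum := by
  induction l with
  | nil => simp
  | cons x t ih => simp only [List.map_cons, List.sum_cons, ih]; ring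

theorem sum_counter_group (xs : List Int) (f : Int → Int) :
    ((PySem.Set.ofList xs).map (fun k => (xs.count k : Int) * f k)).sum = (xs.map f).sum := by
  induction xs using List.reverseRecOn with
  | nil => simp [PySem.Set.ofList]
  | append_singleton xs x ih =>
    by_cases hx : x ∈ xs
    · rw [PySem.Set.ofList_append_singleton, PySem.Set.add_of_mem ((PySem.Set.mem_ofList ..).mpr hx)]
      have hcongr : (PySem.Set.ofList xs).map (fun k => ((xs ++ [x]).count k : Int) * f k)
          = (PySem.Set.ofList xs).map (fun k => (xs.count k : Int) * f k + (if k = x then f k else 0)) := by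
        apply List.map_congr_left
        intro k _
        by_cases hkx : k = x
        · rw [if_pos hkx, hkx]
          have hcount : (xs ++ [x]).count x = xs.count x + 1 := by
            simp [List.count_append]
          rw [hcount]
          push_cast
          ring
        · have h0 : [x].count k = 0 := List.count_eq_zero.mpr (by simp [hkx])
          rw [List.count_append, h0, Nat.add_zero, if_neg hkx, add_zero]
      rw [hcongr, sum_map_add', ih,
          sum_single _ x f (PySem.Set.nodup_ofList ..) ((PySem.Set.mem_ofList ..).mpr hx)]
      simp
    · rw [PySem.Set.ofList_append_singleton,
          PySem.Set.add_of_not_mem (fun h => hx ((PySem.Set.mem_ofList ..).mp h))]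
      simp only [List.map_append, List.sum_append, List.map_cons, List.map_nil, List.sum_cons,
        List.sum_nil]
      have hcongr : (PySem.Set.ofList xs).map (fun k => ((xs ++ [x]).count k : Int) * f k)
          = (PySem.Set.ofList xs).map (fun k => (xs.count k : Int) * f k) := by
        apply List.map_congr_left
        intro k hk
        have hkx : k ≠ x := fun e => hx (e ▸ (PySem.Set.mem_ofList ..).mp hk)
        have h0 : [x].count k = 0 := List.count_eq_zero.mpr (by simp [hkx])
        rw [List.count_append, h0, Nat.add_zero]
      have hcx : (xs ++ [x]).count x = 1 := by
        rw [List.count_append, List.count_eq_zero.mpr hx]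
        simp
      rw [hcongr, ih, hcx]
      simp
theorem modeq_rhs {a b c : Int} (h : a ≡ b [ZMOD 1000000007]) (he : b = c) :
    a ≡ c [ZMOD 1000000007] := he ▸ h

-- FB n rs cur = A's dfs value on the row suffix rs, without memoization
def FB (n : Nat) : List (List Int) → Int → Int
  | [], cur => if cur = 1 then 1 else 0
  | r :: rs, cur =>
    (List.range n).foldl
      (fun res j =>
        PySem.Int.mod (res + (if pygcd cur (r.getD j 0) = 1
          then PySem.Int.mod ((n : Int) ^ rs.length) 1000000007
          else FB n rs (pygcd cur (r.getD j 0)))) 1000000007) 0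

def Vd (n : Nat) (rs : List (List Int)) (st : PySem.Dict Int Int × Int) : Int :=
  st.2 * (n : Int) ^ rs.length + (st.1.items.map (fun p => p.2 * FB n rs p.1)).sum

theorem sum_items_insert' (d : PySem.Dict Int Int) (hnd : d.keys.Nodup) (k a : Int)
    (F : Int → Int) :
    ((d.insert k (PySem.Int.mod (d.getD k 0 + a) 1000000007)).items.map
        (fun p => p.2 * F p.1)).sum
      ≡ (d.items.map (fun p => p.2 * F p.1)).sum + a * F k [ZMOD 1000000007] := by
  rw [pm_eq]; exact sum_items_insert d hnd k a F

theorem FB_cons_modeq (n : Nat) (row : List Int) (rs : List (List Int)) (g : Int) :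
    FB n (row :: rs) g
      ≡ ((List.range n).map (fun j => if pygcd g (row.getD j 0) = 1
            then (n : Int) ^ rs.length else FB n rs (pygcd g (row.getD j 0)))).sum
        [ZMOD 1000000007] := by
  have h1 := foldl_mod_modeq
    (fun j => if pygcd g (row.getD j 0) = 1
      then ((n : Int) ^ rs.length) % 1000000007 else FB n rs (pygcd g (row.getD j 0)))
    (List.range n) 0
  have h2 := sum_modeq
    (fun j => if pygcd g (row.getD j 0) = 1
      then ((n : Int) ^ rs.length) % 1000000007 else FB n rs (pygcd g (row.getD j 0)))
    (fun j => if pygcd g (row.getD j 0) = 1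
      then (n : Int) ^ rs.length else FB n rs (pygcd g (row.getD j 0)))
    (List.range n)
    (fun j _ => by
      beta_reduce
      by_cases h : pygcd g (row.getD j 0) = 1
      · rw [if_pos h, if_pos h]; exact modeq_pm _
      · rw [if_neg h, if_neg h])
  have he : FB n (row :: rs) g
      = (List.range n).foldl
          (fun acc j => (acc + (if pygcd g (row.getD j 0) = 1
            then ((n : Int) ^ rs.length) % 1000000007
            else FB n rs (pygcd g (row.getD j 0)))) % 1000000007) 0 := by
    simp only [FB, pm_eq]
  rw [he]
  exact (modeq_rhs h1 (zero_add _)).trans h2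

theorem inner_fold (n : Nat) (rs : List (List Int)) (row : List Int) (p : Int × Int)
    (l : List Nat) (st : PySem.Dict Int Int × Int) (hnd : st.1.keys.Nodup) :
    Vd n rs (l.foldl (fun acc2 j =>
        if pygcd p.1 (row.getD j 0) = 1 then (acc2.1, PySem.Int.mod (acc2.2 + p.2) 1000000007)
        else (acc2.1.insert (pygcd p.1 (row.getD j 0))
                (PySem.Int.mod (acc2.1.getD (pygcd p.1 (row.getD j 0)) 0 + p.2) 1000000007),
              acc2.2)) st)
      ≡ Vd n rs st + p.2 * (l.map (fun j => if pygcd p.1 (row.getD j 0) = 1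
            then (n : Int) ^ rs.length else FB n rs (pygcd p.1 (row.getD j 0)))).sum
        [ZMOD 1000000007] ∧
    (l.foldl (fun acc2 j =>
        if pygcd p.1 (row.getD j 0) = 1 then (acc2.1, PySem.Int.mod (acc2.2 + p.2) 1000000007)
        else (acc2.1.insert (pygcd p.1 (row.getD j 0))
                (PySem.Int.mod (acc2.1.getD (pygcd p.1 (row.getD j 0)) 0 + p.2) 1000000007),
              acc2.2)) st).1.keys.Nodup := by
  induction l generalizing st with
  | nil => exact ⟨modeq_rhs (Int.ModEq.refl _) (by simp), hnd⟩
  | cons j t ih =>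
    simp only [List.foldl_cons, List.map_cons, List.sum_cons]
    by_cases h : pygcd p.1 (row.getD j 0) = 1
    · rw [if_pos h, if_pos h]
      obtain ⟨ihm, ihn⟩ := ih (st := (st.1, PySem.Int.mod (st.2 + p.2) 1000000007)) hnd
      refine ⟨ihm.trans ?_, ihn⟩
      have hst : Vd n rs (st.1, PySem.Int.mod (st.2 + p.2) 1000000007)
          ≡ Vd n rs st + p.2 * (n : Int) ^ rs.length [ZMOD 1000000007] := by
        simp only [Vd, pm_eq]
        exact modeq_rhs (Int.ModEq.add_right _ (Int.ModEq.mul_right _ (modeq_pm _))) (by ring)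
      exact modeq_rhs (Int.ModEq.add_right _ hst) (by ring)
    · rw [if_neg h, if_neg h]
      obtain ⟨ihm, ihn⟩ := ih
        (st := (st.1.insert (pygcd p.1 (row.getD j 0))
          (PySem.Int.mod (st.1.getD (pygcd p.1 (row.getD j 0)) 0 + p.2) 1000000007), st.2))
        (PySem.Dict.nodup_keys_insert _ _ _ hnd)
      refine ⟨ihm.trans ?_, ihn⟩
      have hst : Vd n rs (st.1.insert (pygcd p.1 (row.getD j 0))
            (PySem.Int.mod (st.1.getD (pygcd p.1 (row.getD j 0)) 0 + p.2) 1000000007), st.2)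
          ≡ Vd n rs st + p.2 * FB n rs (pygcd p.1 (row.getD j 0)) [ZMOD 1000000007] := by
        simp only [Vd]
        exact modeq_rhs
          (Int.ModEq.add_left _ (sum_items_insert' st.1 hnd (pygcd p.1 (row.getD j 0)) p.2 (FB n rs)))
          (by ring)
      exact modeq_rhs (Int.ModEq.add_right _ hst) (by ring)

theorem outer_fold (n : Nat) (rs : List (List Int)) (row : List Int)
    (L : List (Int × Int)) (st : PySem.Dict Int Int × Int) (hnd : st.1.keys.Nodup) :
    Vd n rs (L.foldl (fun acc gc =>
        (List.range n).foldl (fun acc2 j =>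
          if pygcd gc.1 (row.getD j 0) = 1 then (acc2.1, PySem.Int.mod (acc2.2 + gc.2) 1000000007)
          else (acc2.1.insert (pygcd gc.1 (row.getD j 0))
                  (PySem.Int.mod (acc2.1.getD (pygcd gc.1 (row.getD j 0)) 0 + gc.2) 1000000007),
                acc2.2)) acc) st)
      ≡ Vd n rs st + (L.map (fun p => p.2 * ((List.range n).map
            (fun j => if pygcd p.1 (row.getD j 0) = 1
              then (n : Int) ^ rs.length else FB n rs (pygcd p.1 (row.getD j 0)))).sum)).sum
        [ZMOD 1000000007] ∧
    (L.foldl (fun acc gc =>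
        (List.range n).foldl (fun acc2 j =>
          if pygcd gc.1 (row.getD j 0) = 1 then (acc2.1, PySem.Int.mod (acc2.2 + gc.2) 1000000007)
          else (acc2.1.insert (pygcd gc.1 (row.getD j 0))
                  (PySem.Int.mod (acc2.1.getD (pygcd gc.1 (row.getD j 0)) 0 + gc.2) 1000000007),
                acc2.2)) acc) st).1.keys.Nodup := by
  induction L generalizing st with
  | nil => exact ⟨modeq_rhs (Int.ModEq.refl _) (by simp), hnd⟩
  | cons p t ih =>
    simp only [List.foldl_cons, List.map_cons, List.sum_cons]
    obtain ⟨im, inodup⟩ := inner_fold n rs row p (List.range n) st hnd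
    obtain ⟨ihm, ihn⟩ := ih (st := (List.range n).foldl (fun acc2 j =>
        if pygcd p.1 (row.getD j 0) = 1 then (acc2.1, PySem.Int.mod (acc2.2 + p.2) 1000000007)
        else (acc2.1.insert (pygcd p.1 (row.getD j 0))
                (PySem.Int.mod (acc2.1.getD (pygcd p.1 (row.getD j 0)) 0 + p.2) 1000000007),
              acc2.2)) st) inodup
    refine ⟨ihm.trans ?_, ihn⟩
    exact modeq_rhs (Int.ModEq.add_right _ im) (by ring)

theorem stepB_modeq (n : Nat) (row : List Int) (rs : List (List Int))
    (c : PySem.Dict Int Int) (d : Int) :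
    Vd n rs (stepB n (c, d) row) ≡ Vd n (row :: rs) (c, d) [ZMOD 1000000007] ∧
      (stepB n (c, d) row).1.keys.Nodup := by
  obtain ⟨om, onodup⟩ := outer_fold n rs row c.items
    (PySem.Dict.empty, PySem.Int.mod ((d : Int) * (n : Int)) 1000000007)
    (by simp [PySem.Dict.keys_empty])
  constructor
  · show Vd n rs (stepB n (c, d) row) ≡ _ [ZMOD 1000000007]
    simp only [stepB]
    refine om.trans ?_
    have h1 : Vd n rs (PySem.Dict.empty, PySem.Int.mod (d * (n : Int)) 1000000007)
        ≡ d * (n : Int) ^ (row :: rs).length [ZMOD 1000000007] := by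
      simp only [Vd, pm_eq]
      have : (PySem.Dict.empty : PySem.Dict Int Int).items = [] := rfl
      rw [this]
      simp only [List.map_nil, List.sum_nil, add_zero, List.length_cons]
      exact modeq_rhs (Int.ModEq.mul_right _ (modeq_pm _)) (by rw [pow_succ]; ring)
    have h2 : (c.items.map (fun p => p.2 * ((List.range n).map
          (fun j => if pygcd p.1 (row.getD j 0) = 1
            then (n : Int) ^ rs.length else FB n rs (pygcd p.1 (row.getD j 0)))).sum)).sum
        ≡ (c.items.map (fun p => p.2 * FB n (row :: rs) p.1)).sum [ZMOD 1000000007] :=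
      sum_modeq _ _ _ (fun p _ =>
        Int.ModEq.mul_left _ (FB_cons_modeq n row rs p.1).symm)
    exact modeq_rhs (Int.ModEq.add h1 h2) (by simp only [Vd])
  · show (stepB n (c, d) row).1.keys.Nodup
    simp only [stepB]
    exact onodup

theorem rows_fold (n : Nat) (rows : List (List Int)) :
    ∀ (st : PySem.Dict Int Int × Int), st.1.keys.Nodup →
    Vd n [] (rows.foldl (stepB n) st) ≡ Vd n rows st [ZMOD 1000000007] ∧
      (rows.foldl (stepB n) st).1.keys.Nodup := by
  induction rows with
  | nil => exact fun st h => ⟨Int.ModEq.refl _, h⟩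
  | cons r t ih =>
    intro st hnd
    obtain ⟨c, d⟩ := st
    obtain ⟨sm, snodup⟩ := stepB_modeq n r t c d
    obtain ⟨ihm, ihn⟩ := ih (stepB n (c, d) r) snodup
    exact ⟨ihm.trans sm, ihn⟩

theorem countCoprime_alt_eq (r0 : List Int) (rest : List (List Int)) :
    countCoprime_alt (r0 :: rest)
      = ((List.range r0.length).map
          (fun j => FB r0.length rest (r0.getD j 0))).sum % 1000000007 := by
  simp only [countCoprime_alt, List.headD_cons, List.tail_cons, pm_eq]
  rw [PySem.Dict.foldl_insert_getD_add_one_eq_counter r0]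
  obtain ⟨rm, rnodup⟩ := rows_fold r0.length rest (PySem.Dict.counter r0, 0)
    (PySem.Dict.nodup_keys_counter r0)
  have hfin : (rest.foldl (stepB r0.length) (PySem.Dict.counter r0, 0)).2
        + (rest.foldl (stepB r0.length) (PySem.Dict.counter r0, 0)).1.getD 1 0
      = Vd r0.length [] (rest.foldl (stepB r0.length) (PySem.Dict.counter r0, 0)) := by
    simp only [Vd, List.length_nil, pow_zero, mul_one]
    rw [← sum_items_ite _ rnodup]
    have hFB : ∀ p : Int × Int, p.2 * FB r0.length [] p.1
        = p.2 * (if p.1 = 1 then 1 else 0) := fun p => rfl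
    simp only [hFB]
  have hinit : Vd r0.length rest (PySem.Dict.counter r0, 0)
      = ((List.range r0.length).map (fun j => FB r0.length rest (r0.getD j 0))).sum := by
    simp only [Vd, zero_mul, zero_add]
    rw [PySem.Dict.items_counter r0, List.map_map]
    have : ((fun p : Int × Int => p.2 * FB r0.length rest p.1) ∘
        (fun k => (k, (r0.count k : Int)))) = fun k => (r0.count k : Int) * FB r0.length rest k := rfl
    rw [this, sum_counter_group r0 (FB r0.length rest)]
    have h2 : (List.range r0.length).map (fun j => FB r0.length rest (r0.getD j 0))
        = ((List.range r0.length).map (fun j => r0.getD j 0)).map (FB r0.length rest) := by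
      rw [List.map_map]; rfl
    rw [h2, map_range_getD r0]
  rw [hfin]
  have := rm.trans (by rw [hinit])
  exact this

-- ---------- Part A : the memoized DFS computes FB ----------

def InvA (mat : List (List Int)) (n : Nat) (memo : PySem.Dict (Nat × Int) Int) : Prop :=
  ∀ i cur v, memo.get? (i, cur) = some v → v = FB n (mat.drop i) cur

theorem dfsA_correct (mat : List (List Int)) (n : Nat) :
    ∀ (fuel i : Nat) (cur : Int) (memo : PySem.Dict (Nat × Int) Int),
      i + fuel = mat.length → InvA mat n memo →
      (dfsA mat mat.length n fuel i cur memo).1 = FB n (mat.drop i) cur ∧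
        InvA mat n (dfsA mat mat.length n fuel i cur memo).2 := by
  intro fuel
  induction fuel with
  | zero =>
    intro i cur memo hi hinv
    have : i = mat.length := by omega
    subst this
    simp only [dfsA, List.drop_length]
    exact ⟨rfl, hinv⟩
  | succ k ih =>
    intro i cur memo hi hinv
    have hlt : i < mat.length := by omega
    have hne : ¬ i = mat.length := by omega
    have hrow : mat.getD i [] = mat[i] := List.getD_eq_getElem mat [] hlt
    have hexp : mat.length - i - 1 = (mat.drop (i + 1)).length := by
      rw [List.length_drop]; omega
    have hdrop : mat.drop i = mat[i] :: mat.drop (i + 1) := List.drop_eq_getElem_cons hlt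
    simp only [dfsA, if_neg hne]
    rcases hg : memo.get? (i, cur) with _ | v
    · have inner : ∀ (l : List Nat) (a : Int) (mm : PySem.Dict (Nat × Int) Int),
          InvA mat n mm →
          ((l.foldl (fun (acc : Int × PySem.Dict (Nat × Int) Int) j =>
              if pygcd cur ((mat.getD i []).getD j 0) = 1 then
                (PySem.Int.mod (acc.1 + PySem.Int.mod ((n : Int) ^ (mat.length - i - 1)) 1000000007)
                   1000000007, acc.2)
              else
                (PySem.Int.mod (acc.1 +
                    (dfsA mat mat.length n k (i + 1) (pygcd cur ((mat.getD i []).getD j 0)) acc.2).1)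
                   1000000007,
                 (dfsA mat mat.length n k (i + 1) (pygcd cur ((mat.getD i []).getD j 0)) acc.2).2))
            (a, mm)).1
            = l.foldl (fun res j =>
                PySem.Int.mod (res + (if pygcd cur (mat[i].getD j 0) = 1
                  then PySem.Int.mod ((n : Int) ^ (mat.drop (i + 1)).length) 1000000007
                  else FB n (mat.drop (i + 1)) (pygcd cur (mat[i].getD j 0)))) 1000000007) a)
          ∧ InvA mat n ((l.foldl (fun (acc : Int × PySem.Dict (Nat × Int) Int) j =>
              if pygcd cur ((mat.getD i []).getD j 0) = 1 then
                (PySem.Int.mod (acc.1 + PySem.Int.mod ((n : Int) ^ (mat.length - i - 1)) 1000000007)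
                   1000000007, acc.2)
              else
                (PySem.Int.mod (acc.1 +
                    (dfsA mat mat.length n k (i + 1) (pygcd cur ((mat.getD i []).getD j 0)) acc.2).1)
                   1000000007,
                 (dfsA mat mat.length n k (i + 1) (pygcd cur ((mat.getD i []).getD j 0)) acc.2).2))
            (a, mm)).2) := by
        intro l
        induction l with
        | nil => exact fun a mm h => ⟨rfl, h⟩
        | cons j t iht =>
          intro a mm hmm
          simp only [List.foldl_cons]
          by_cases h : pygcd cur ((mat.getD i []).getD j 0) = 1
          · rw [if_pos h, if_pos (by rwa [hrow] at h)]
            have ha : PySem.Int.mod (a + PySem.Int.mod ((n : Int) ^ (mat.length - i - 1)) 1000000007) 1000000007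
                = PySem.Int.mod (a + PySem.Int.mod ((n : Int) ^ (mat.drop (i + 1)).length) 1000000007) 1000000007 := by
              rw [hexp]
            rw [ha]
            exact iht _ mm hmm
          · have h' : ¬ pygcd cur (mat[i].getD j 0) = 1 := by rwa [hrow] at h
            rw [if_neg h, if_neg h']
            obtain ⟨hv, hinv2⟩ := ih (i + 1) (pygcd cur ((mat.getD i []).getD j 0)) mm
              (by omega) hmm
            have ha : PySem.Int.mod (a +
                (dfsA mat mat.length n k (i + 1) (pygcd cur ((mat.getD i []).getD j 0)) mm).1) 1000000007
                = PySem.Int.mod (a + FB n (mat.drop (i + 1)) (pygcd cur (mat[i].getD j 0))) 1000000007 := by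
              rw [hv, hrow]
            rw [ha]
            exact iht _ _ hinv2
      obtain ⟨hfold, hinvf⟩ := inner (List.range n) 0 memo hinv
      constructor
      · show (_ : Int × PySem.Dict (Nat × Int) Int).1 = _
        simp only [hfold]
        rw [hdrop]
        rfl
      · intro i' cur' v hv
        rw [PySem.Dict.get?_insert] at hv
        by_cases hk : (i', cur') = (i, cur)
        · rw [if_pos hk] at hv
          rw [Prod.mk.injEq] at hk
          obtain ⟨rfl, rfl⟩ := hk
          injection hv with hv'
          rw [← hv', hfold, hdrop]
          rfl
        · rw [if_neg hk] at hv
          exact hinvf i' cur' v hv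
    · exact ⟨hinv i cur v hg, hinv⟩

theorem countCoprime_eq (r0 : List Int) (rest : List (List Int)) :
    countCoprime (r0 :: rest)
      = ((List.range r0.length).map
          (fun j => FB r0.length rest (r0.getD j 0))).sum % 1000000007 := by
  simp only [countCoprime, List.headD_cons]
  have htop : ∀ (l : List Nat) (a : Int) (mm : PySem.Dict (Nat × Int) Int),
      InvA (r0 :: rest) r0.length mm →
      (l.foldl (fun (acc : Int × PySem.Dict (Nat × Int) Int) j =>
          (PySem.Int.mod (acc.1 + (dfsA (r0 :: rest) (r0 :: rest).length r0.length
              ((r0 :: rest).length - 1) 1 (r0.getD j 0) acc.2).1) 1000000007,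
           (dfsA (r0 :: rest) (r0 :: rest).length r0.length
              ((r0 :: rest).length - 1) 1 (r0.getD j 0) acc.2).2)) (a, mm)).1
        = l.foldl (fun res j =>
            (res + FB r0.length rest (r0.getD j 0)) % 1000000007) a := by
    intro l
    induction l with
    | nil => exact fun a mm _ => rfl
    | cons j t iht =>
      intro a mm hmm
      simp only [List.foldl_cons]
      obtain ⟨hv, hinv2⟩ := dfsA_correct (r0 :: rest) r0.length
        ((r0 :: rest).length - 1) 1 (r0.getD j 0) mm (by simp; omega) hmm
      rw [hv]
      have : (r0 :: rest).drop 1 = rest := rfl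
      rw [this, pm_eq]
      exact iht _ _ hinv2
  have hempty : InvA (r0 :: rest) r0.length PySem.Dict.empty := by
    intro i cur v hv
    rw [PySem.Dict.get?_empty] at hv
    cases hv
  rw [htop (List.range r0.length) 0 PySem.Dict.empty hempty]
  have hz := foldl_mod_eq (fun j => FB r0.length rest (r0.getD j 0)) (List.range r0.length) 0
  norm_num at hz
  exact hz

-- ===== VERDICT (by name: the statement is the Claim_ definition above) =====
theorem countCoprime_spec : Claim_equal_countCoprime := by
  intro mat _ hpre
  unfold Spec_countCoprime
  obtain ⟨hne, -⟩ := hpre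
  match mat, hne with
  | r0 :: rest, _ => rw [countCoprime_eq, countCoprime_alt_eq]
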